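-- pv_equiv track=rewrite | github.com/mdolmen/daily_coding_problem | 029-rain-between-walls/solution.py | count_water_units
-- ===== SOURCE A (Python) =====
-- def count_water_units(walls):
--     units = 0
--
--     for i in range(1, len(walls)):
--         w1 = walls[i-1]
--         w2 = walls[i]
--         diff = w1 - w2
--
--         if diff > 0:
--             units += diff
--             walls[i] += diff
--
--     return units
-- ===== SOURCE B (Python) =====
-- def count_water_units(walls):
--     # Two-pass: build the prefix-maximum table, then sum the differences.
--     pmax = []
--     m = None
--     for w in walls:
--         m = w if m is None else max(m, w)
--         pmax.append(m)
--     units = sum(p - w for p, w in zip(pmax, walls))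
--     walls[:] = pmax  # same in-place effect as A (walls[i] becomes the running max)
--     return units
-- ===== Notes on version B (the rewrite author's own statement) =====
-- stated objective: alternative
-- what changed: Replaces A's single fused index loop (which accumulates units and mutates walls as it goes) with two separate passes: first build the prefix-maximum table, then sum pmax[i]-walls[i] over a zip, finally assign walls[:] = pmax for the same side effect.
import Mathlib
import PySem

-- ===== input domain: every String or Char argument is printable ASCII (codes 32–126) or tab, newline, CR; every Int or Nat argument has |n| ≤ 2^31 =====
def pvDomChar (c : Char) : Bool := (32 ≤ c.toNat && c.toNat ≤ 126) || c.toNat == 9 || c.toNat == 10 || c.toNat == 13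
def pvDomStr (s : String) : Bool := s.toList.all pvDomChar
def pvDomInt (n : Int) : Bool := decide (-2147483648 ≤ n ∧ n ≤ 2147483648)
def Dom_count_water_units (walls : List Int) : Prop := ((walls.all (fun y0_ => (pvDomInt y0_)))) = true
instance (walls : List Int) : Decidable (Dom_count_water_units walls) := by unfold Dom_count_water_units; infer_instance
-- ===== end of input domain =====

-- B replaces A's fused accumulate-and-mutate index loop with a prefix-max table pass
-- plus a separate summing pass (Python B performs the same in-place mutation of walls;
-- the equivalence proved here is about the RETURN value).

-- ===== PORT A =====
def count_water_units (walls : List Int) : Int :=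
  ((PySem.List.pyRange 1 (PySem.List.len walls) 1).foldl
    (fun (st : Int × List Int) i =>
      let w1 := PySem.List.pyGetD st.2 (i - 1) 0
      let w2 := PySem.List.pyGetD st.2 i 0
      let diff := w1 - w2
      if diff > 0 then (st.1 + diff, PySem.List.pySetD st.2 i (w2 + diff)) else st)
    (0, walls)).1

-- ===== PORT B =====
-- running-max scan after the first element ('m = max(m, w); pmax.append(m)')
def pvScanMax : Int → List Int → List Int
  | _, [] => []
  | m, x :: xs => max m x :: pvScanMax (max m x) xs

-- 'pmax' of Source B: first element starts the running max ('m = w if m is None else …')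
def pvPrefixMax : List Int → List Int
  | [] => []
  | x :: xs => x :: pvScanMax x xs

def count_water_units_alt (walls : List Int) : Int :=
  ((pvPrefixMax walls).zip walls).foldl (fun s pw => s + (pw.1 - pw.2)) 0

-- ===== PRECONDITION & SPEC =====
def Spec_count_water_units (walls : List Int) (out : Int) : Prop := out = count_water_units_alt walls
instance (walls : List Int) (out : Int) : Decidable (Spec_count_water_units walls out) := by unfold Spec_count_water_units; infer_instance

-- ===== CLAIM (what is proved, stated in full; the proofs are below) =====
def Claim_equal_count_water_units : Prop := ∀ (walls : List Int), Dom_count_water_units walls → Spec_count_water_units walls (count_water_units walls)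

-- ===== LEMMAS AND PROOFS =====

-- common specification: water collected over 'rest' with running max 'm' so far
def pvSpec : Int → List Int → Int
  | _, [] => 0
  | m, x :: xs => (max m x - x) + pvSpec (max m x) xs

-- B's summing fold over the scanned table equals pvSpec
theorem pv_alt_inv (ws : List Int) : ∀ (m s : Int),
    ((pvScanMax m ws).zip ws).foldl (fun s pw => s + (pw.1 - pw.2)) s = s + pvSpec m ws := by
  induction ws with
  | nil => intro m s; simp [pvScanMax, pvSpec]
  | cons x xs ih =>
      intro m s
      simp only [pvScanMax, pvSpec, List.zip_cons_cons, List.foldl_cons, ih]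
      ring

theorem pv_alt_nil : count_water_units_alt [] = 0 := by
  simp [count_water_units_alt, pvPrefixMax]

theorem pv_alt_cons (x : Int) (xs : List Int) : count_water_units_alt (x :: xs) = pvSpec x xs := by
  simp [count_water_units_alt, pvPrefixMax, pv_alt_inv]

-- A's index loop, started after a processed prefix p, computes pvSpec of the rest
theorem pv_a_inv (rest : List Int) : ∀ (p : List Int) (hp : p ≠ []) (u : Int),
    ((PySem.List.pyRange (p.length : Int) ((p.length : Int) + rest.length) 1).foldl
      (fun (st : Int × List Int) i =>
        let w1 := PySem.List.pyGetD st.2 (i - 1) 0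
        let w2 := PySem.List.pyGetD st.2 i 0
        let diff := w1 - w2
        if diff > 0 then (st.1 + diff, PySem.List.pySetD st.2 i (w2 + diff)) else st)
      (u, p ++ rest)).1 = u + pvSpec (p.getLast hp) rest := by
  induction rest with
  | nil =>
      intro p hp u
      rw [PySem.List.pyRange_one_eq_nil (by simp)]
      simp [pvSpec]
  | cons x xs ih =>
      intro p hp u
      have h1 : 1 ≤ p.length := List.length_pos_of_ne_nil hp
      have hw1 : PySem.List.pyGetD (p ++ x :: xs) ((p.length : Int) - 1) 0 = p.getLast hp := by
        rw [show ((p.length : Int) - 1) = ((p.length - 1 : Nat) : Int) by omega,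
            PySem.List.pyGetD_natCast]
        rw [List.getD_eq_getElem _ _ (by simp; omega), List.getElem_append_left (by omega)]
        exact (List.getLast_eq_getElem hp).symm
      have hw2 : PySem.List.pyGetD (p ++ x :: xs) ((p.length : Int)) 0 = x := by
        simp [List.getD]
      rw [PySem.List.pyRange_one_cons (by push_cast [List.length_cons]; omega)]
      simp only [List.foldl_cons, hw1, hw2]
      by_cases hd : p.getLast hp - x > 0
      · rw [if_pos hd]
        have hset : PySem.List.pySetD (p ++ x :: xs) ((p.length : Int)) (x + (p.getLast hp - x))
            = (p ++ [p.getLast hp]) ++ xs := by simp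
        rw [hset]
        have harg1 : (p.length : Int) + 1 = ((p ++ [p.getLast hp]).length : Int) := by
          simp
        have harg2 : (p.length : Int) + ((x :: xs).length : Int)
            = ((p ++ [p.getLast hp]).length : Int) + (xs.length : Int) := by
          simp; ring
        rw [harg1, harg2, ih (p ++ [p.getLast hp]) (by simp) (u + (p.getLast hp - x))]
        rw [List.getLast_append_singleton]
        simp only [pvSpec, max_eq_left (by omega : x ≤ p.getLast hp)]
        ring
      · rw [if_neg hd]
        have harg1 : (p.length : Int) + 1 = ((p ++ [x]).length : Int) := by simp
        have harg2 : (p.length : Int) + ((x :: xs).length : Int)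
            = ((p ++ [x]).length : Int) + (xs.length : Int) := by simp; ring
        have hws : p ++ x :: xs = (p ++ [x]) ++ xs := by simp
        rw [harg1, harg2, hws, ih (p ++ [x]) (by simp) u]
        rw [List.getLast_append_singleton]
        simp only [pvSpec, max_eq_right (by omega : p.getLast hp ≤ x)]
        ring

-- ===== VERDICT (by name: the statement is the Claim_ definition above) =====
theorem count_water_units_spec : Claim_equal_count_water_units := by
  intro walls _
  unfold Spec_count_water_units
  cases walls with
  | nil =>
      rw [pv_alt_nil]
      simp [count_water_units, PySem.List.pyRange_one_eq_nil]
  | cons x xs =>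
      rw [pv_alt_cons]
      have h := pv_a_inv xs [x] (by simp) 0
      simp only [List.length_singleton, Nat.cast_one, List.singleton_append,
        List.getLast_singleton, zero_add] at h
      unfold count_water_units
      rw [PySem.List.len_eq,
        show (((x :: xs).length : Int)) = 1 + (xs.length : Int) by
          push_cast [List.length_cons]; ring]
      exact h
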